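-- pv_equiv track=rewrite | github.com/bambamshivam/Codeforces | Harbour_Space_Contest'21/C.py | solve
-- ===== SOURCE A (Python) =====
-- def solve(l,r,s,i):
-- 	if (l+ (10-i+1)//2<r) or (r + (10-i)//2 +1<l):
-- 		return i-1
-- 	if i==10:
-- 		return 10
-- 	if s[i-1]=='1':
-- 		if i%2!=0:
-- 			return solve(l+1,r,s,i+1)
-- 		else:
-- 			return solve(l,r+1,s,i+1)
-- 	elif s[i-1]=='0':
-- 		return solve(l,r,s,i+1)
-- 	else:
-- 		if i%2!=0:
-- 			return min(solve(l+1,r,s,i+1),solve(l,r,s,i+1))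
-- 		else:
-- 			return min(solve(l,r+1,s,i+1),solve(l,r,s,i+1))
-- ===== SOURCE B (Python) =====
-- def solve(l, r, s, i):
--     # Iterative re-implementation: explicit worklist of (l, r, i) states with a
--     # running minimum over the leaf candidates, replacing A's recursion.
--     best = None
--     stack = [(l, r, i)]
--     while stack:
--         cl, cr, ci = stack.pop()
--         if (cl + (10 - ci + 1) // 2 < cr) or (cr + (10 - ci) // 2 + 1 < cl):
--             cand = ci - 1
--         elif ci == 10:
--             cand = 10
--         else:
--             ch = s[ci - 1]
--             if ch == '1':
--                 if ci % 2 != 0: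
--                     stack.append((cl + 1, cr, ci + 1))
--                 else:
--                     stack.append((cl, cr + 1, ci + 1))
--             elif ch == '0':
--                 stack.append((cl, cr, ci + 1))
--             else:
--                 if ci % 2 != 0:
--                     stack.append((cl + 1, cr, ci + 1))
--                 else:
--                     stack.append((cl, cr + 1, ci + 1))
--                 stack.append((cl, cr, ci + 1))
--             continue
--         best = cand if best is None else min(best, cand)
--     return best
-- ===== Notes on version B (the rewrite author's own statement) =====
-- stated objective: alternative
-- what changed: Replaced A's recursion (with min over the two recursive calls on '?') by an iterative explicit worklist of (l, r, i) states that applies the same checks in the same order and keeps a running minimum over the leaf candidates.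
import Mathlib
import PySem

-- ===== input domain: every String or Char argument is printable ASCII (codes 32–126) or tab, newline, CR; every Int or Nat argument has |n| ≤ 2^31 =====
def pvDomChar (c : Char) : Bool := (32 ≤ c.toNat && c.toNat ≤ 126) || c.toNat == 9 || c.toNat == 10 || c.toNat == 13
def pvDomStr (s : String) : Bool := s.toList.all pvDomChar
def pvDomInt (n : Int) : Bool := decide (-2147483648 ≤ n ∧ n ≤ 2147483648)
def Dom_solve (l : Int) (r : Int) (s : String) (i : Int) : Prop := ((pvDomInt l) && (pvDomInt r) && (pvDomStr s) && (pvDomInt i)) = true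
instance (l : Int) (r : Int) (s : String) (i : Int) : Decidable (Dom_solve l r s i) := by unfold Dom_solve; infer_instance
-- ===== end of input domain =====

-- B replaces A's recursion by an explicit worklist with a running minimum (same checks, same
-- guard order); equivalence is proved on Pre_solve, which excludes exactly the IndexError inputs
-- (alternative decomposition, not faster).

-- ===== PORT A =====
-- A's recursion, with a fuel counter as a totality guard; `solve` below supplies enough fuel
-- for every input (the recursion always prunes by position 12), so the fuel-0 branch is unreachable.
def solveF : Nat → Int → Int → String → Int → Int
  | 0, _, _, _, _ => 0
  | fuel+1, l, r, s, i =>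
    if l + PySem.Int.floordiv (10 - i + 1) 2 < r ∨ r + PySem.Int.floordiv (10 - i) 2 + 1 < l then
      i - 1
    else if i = 10 then 10
    else
      match PySem.Str.pyGet? s (i - 1) with
      | none => 0  -- Python raises IndexError here; excluded by Pre_solve
      | some c =>
        if c = '1' then
          if PySem.Int.mod i 2 ≠ 0 then solveF fuel (l + 1) r s (i + 1)
          else solveF fuel l (r + 1) s (i + 1)
        else if c = '0' then solveF fuel l r s (i + 1)
        else
          if PySem.Int.mod i 2 ≠ 0 then
            min (solveF fuel (l + 1) r s (i + 1)) (solveF fuel l r s (i + 1))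
          else
            min (solveF fuel l (r + 1) s (i + 1)) (solveF fuel l r s (i + 1))

def solve (l : Int) (r : Int) (s : String) (i : Int) : Int :=
  solveF ((13 - i).toNat + 1) l r s i

-- ===== PORT B =====
-- best = cand if best is None else min(best, cand)
def pvMerge (acc : Option Int) (c : Int) : Option Int :=
  some (match acc with | none => c | some b => min b c)

-- The while-loop of Source B: pop a state, record a candidate or push its child state(s).
-- Fuel is a totality guard only; `solve_alt` supplies enough for every input.
def loopF : Nat → List (Int × Int × Int) → Option Int → String → Int
  | 0, _, acc, _ => acc.getD 0
  | _+1, [], acc, _ => acc.getD 0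
  | fuel+1, (cl, cr, ci) :: rest, acc, s =>
    if cl + PySem.Int.floordiv (10 - ci + 1) 2 < cr ∨ cr + PySem.Int.floordiv (10 - ci) 2 + 1 < cl then
      loopF fuel rest (pvMerge acc (ci - 1)) s
    else if ci = 10 then
      loopF fuel rest (pvMerge acc 10) s
    else
      match PySem.Str.pyGet? s (ci - 1) with
      | none => 0  -- Python raises IndexError here; excluded by Pre_solve
      | some ch =>
        if ch = '1' then
          loopF fuel ((if PySem.Int.mod ci 2 ≠ 0 then (cl + 1, cr, ci + 1) else (cl, cr + 1, ci + 1)) :: rest) acc s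
        else if ch = '0' then
          loopF fuel ((cl, cr, ci + 1) :: rest) acc s
        else
          loopF fuel ((cl, cr, ci + 1) :: (if PySem.Int.mod ci 2 ≠ 0 then (cl + 1, cr, ci + 1) else (cl, cr + 1, ci + 1)) :: rest) acc s

def solve_alt (l : Int) (r : Int) (s : String) (i : Int) : Int :=
  loopF (2 ^ (13 - i).toNat) [(l, r, i)] none s

-- ===== PRECONDITION & SPEC =====
-- The pruning test of A depends on (l, r) only through r - l, so the set of r - l values alive at
-- each position is an integer interval.  pvSafe advances that interval one position at a time
-- (clipping it to the no-prune band, then shifting/widening it by the character read) and reports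
-- whether an out-of-range read is ever performed: Pre_solve holds exactly on the inputs where A
-- returns normally, and excludes exactly those where A raises IndexError.  This is a linear
-- interval bound, not a run of either port's exponential search.
def pvLB (ci : Int) : Int := -(PySem.Int.floordiv (10 - ci) 2 + 1)
def pvHB (ci : Int) : Int := PySem.Int.floordiv (10 - ci + 1) 2

def pvSafe : Nat → Int → Int → String → Int → Bool
  | 0, _, _, _, _ => true
  | f+1, lo, hi, s, ci =>
    if min hi (pvHB ci) < max lo (pvLB ci) then true
    else if ci = 10 then true
    else
      match PySem.Str.pyGet? s (ci - 1) with
      | none => false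
      | some c =>
        if c = '1' then
          if PySem.Int.mod ci 2 ≠ 0 then pvSafe f (max lo (pvLB ci) - 1) (min hi (pvHB ci) - 1) s (ci + 1)
          else pvSafe f (max lo (pvLB ci) + 1) (min hi (pvHB ci) + 1) s (ci + 1)
        else if c = '0' then pvSafe f (max lo (pvLB ci)) (min hi (pvHB ci)) s (ci + 1)
        else
          if PySem.Int.mod ci 2 ≠ 0 then pvSafe f (max lo (pvLB ci) - 1) (min hi (pvHB ci)) s (ci + 1)
          else pvSafe f (max lo (pvLB ci)) (min hi (pvHB ci) + 1) s (ci + 1)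

def Pre_solve (l : Int) (r : Int) (s : String) (i : Int) : Prop :=
  pvSafe (12 - i).toNat (r - l) (r - l) s i = true
instance (l : Int) (r : Int) (s : String) (i : Int) : Decidable (Pre_solve l r s i) := by
  unfold Pre_solve; infer_instance

def pvWitness_solve : Int × Int × String × Int := (0, 0, "??????????", 1)

def Spec_solve (l : Int) (r : Int) (s : String) (i : Int) (out : Int) : Prop := out = solve_alt l r s i
instance (l : Int) (r : Int) (s : String) (i : Int) (out : Int) : Decidable (Spec_solve l r s i out) := by unfold Spec_solve; infer_instance

-- ===== CLAIM (what is proved, stated in full; the proofs are below) =====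
def Claim_equal_solve : Prop := ∀ (l : Int) (r : Int) (s : String) (i : Int), Dom_solve l r s i → Pre_solve l r s i → Spec_solve l r s i (solve l r s i)

-- ===== LEMMAS AND PROOFS =====

-- value A computes from a worklist state (with exactly the fuel `solve` would supply)
def pvV (s : String) (st : Int × Int × Int) : Int :=
  solveF ((13 - st.2.2).toNat + 1) st.1 st.2.1 s st.2.2

-- fuel weight of a state and of a whole worklist
def pvW (st : Int × Int × Int) : Nat := 2 ^ (13 - st.2.2).toNat - 1
def pvMu (stack : List (Int × Int × Int)) : Nat := (stack.map pvW).sum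

-- a state all of whose reads stay in range: its r - l lies in a pvSafe-accepted interval
def pvGood (s : String) (st : Int × Int × Int) : Prop :=
  ∃ lo hi : Int, lo ≤ st.2.1 - st.1 ∧ st.2.1 - st.1 ≤ hi ∧
    pvSafe (12 - st.2.2).toNat lo hi s st.2.2 = true

lemma pvFd2 (a : Int) : PySem.Int.floordiv a 2 = a / 2 :=
  PySem.Int.floordiv_eq_ediv_of_pos (by norm_num)

lemma pvBand11 (cl cr ci : Int)
    (h : ¬ (cl + PySem.Int.floordiv (10 - ci + 1) 2 < cr ∨ cr + PySem.Int.floordiv (10 - ci) 2 + 1 < cl)) :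
    ci ≤ 11 := by
  rw [pvFd2, pvFd2] at h; omega

lemma pvMerge_assoc (a : Option Int) (x y : Int) :
    pvMerge (pvMerge a x) y = pvMerge a (min x y) := by
  cases a <;> simp [pvMerge, min_assoc]

lemma loopF_nil (f : Nat) (acc : Option Int) (s : String) :
    loopF f [] acc s = acc.getD 0 := by
  cases f <;> rfl

lemma pvSafe_step (s : String) (lo hi cl cr ci : Int)
    (hs : pvSafe (12 - ci).toNat lo hi s ci = true)
    (hlo : lo ≤ cr - cl) (hhi : cr - cl ≤ hi)
    (hnp : ¬ (cl + PySem.Int.floordiv (10 - ci + 1) 2 < cr ∨ cr + PySem.Int.floordiv (10 - ci) 2 + 1 < cl))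
    (h10 : ci ≠ 10) :
    ∃ c, PySem.Str.pyGet? s (ci - 1) = some c ∧
      ((c = '0' ∨ (c ≠ '0' ∧ c ≠ '1')) → pvGood s (cl, cr, ci + 1)) ∧
      ((c = '1' ∨ (c ≠ '0' ∧ c ≠ '1')) →
        pvGood s (if PySem.Int.mod ci 2 ≠ 0 then (cl + 1, cr, ci + 1) else (cl, cr + 1, ci + 1))) := by
  have h11 : ci ≤ 11 := pvBand11 cl cr ci hnp
  have hband : pvLB ci ≤ cr - cl ∧ cr - cl ≤ pvHB ci := by
    unfold pvLB pvHB; rw [pvFd2, pvFd2]; rw [pvFd2, pvFd2] at hnp; omega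
  have hk : (12 - ci).toNat = (12 - (ci + 1)).toNat + 1 := by omega
  rw [hk] at hs
  simp only [pvSafe] at hs
  rw [if_neg (by omega : ¬ min hi (pvHB ci) < max lo (pvLB ci)), if_neg h10] at hs
  cases hc : PySem.Str.pyGet? s (ci - 1) with
  | none => rw [hc] at hs; simp at hs
  | some c =>
    rw [hc] at hs
    dsimp only at hs
    refine ⟨c, rfl, ?_, ?_⟩
    · intro hcase
      rcases hcase with h0 | ⟨h0, h1⟩
      · rw [if_neg (by rw [h0]; decide), if_pos h0] at hs
        exact ⟨max lo (pvLB ci), min hi (pvHB ci), by simp; omega, by simp; omega, hs⟩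
      · rw [if_neg h1, if_neg h0] at hs
        by_cases hpar : PySem.Int.mod ci 2 ≠ 0
        · rw [if_pos hpar] at hs
          exact ⟨max lo (pvLB ci) - 1, min hi (pvHB ci), by simp; omega, by simp; omega, hs⟩
        · rw [if_neg hpar] at hs
          exact ⟨max lo (pvLB ci), min hi (pvHB ci) + 1, by simp; omega, by simp; omega, hs⟩
    · intro hcase
      by_cases hpar : PySem.Int.mod ci 2 ≠ 0
      · rw [if_pos hpar]
        rcases hcase with h1 | ⟨h0, h1⟩
        · rw [if_pos h1, if_pos hpar] at hs
          exact ⟨max lo (pvLB ci) - 1, min hi (pvHB ci) - 1, by simp; omega, by simp; omega, hs⟩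
        · rw [if_neg h1, if_neg h0, if_pos hpar] at hs
          exact ⟨max lo (pvLB ci) - 1, min hi (pvHB ci), by simp; omega, by simp; omega, hs⟩
      · rw [if_neg hpar]
        rcases hcase with h1 | ⟨h0, h1⟩
        · rw [if_pos h1, if_neg hpar] at hs
          exact ⟨max lo (pvLB ci) + 1, min hi (pvHB ci) + 1, by simp; omega, by simp; omega, hs⟩
        · rw [if_neg h1, if_neg h0, if_neg hpar] at hs
          exact ⟨max lo (pvLB ci), min hi (pvHB ci) + 1, by simp; omega, by simp; omega, hs⟩

lemma loop_inv (s : String) :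
    ∀ (f : Nat) (stack : List (Int × Int × Int)) (acc : Option Int),
      (∀ st ∈ stack, pvGood s st ∧ st.2.2 ≤ 12) →
      pvMu stack ≤ f →
      loopF f stack acc s = (stack.foldl (fun a st => pvMerge a (pvV s st)) acc).getD 0 := by
  intro f
  induction f with
  | zero =>
    intro stack acc hst hmu
    cases stack with
    | nil => rfl
    | cons st rest =>
      exfalso
      have h12 := (hst st (by simp)).2
      have hw : 1 ≤ pvW st := by
        have : 1 ≤ (13 - st.2.2).toNat := by omega
        have : 2 ≤ 2 ^ (13 - st.2.2).toNat :=
          le_trans (by norm_num) (Nat.pow_le_pow_right (by norm_num) this)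
        simp [pvW]; omega
      have : 1 ≤ pvMu (st :: rest) := by
        simp [pvMu]; omega
      omega
  | succ f ih =>
    intro stack acc hst hmu
    cases stack with
    | nil => exact loopF_nil _ _ _
    | cons st rest =>
      obtain ⟨cl, cr, ci⟩ := st
      have h12 : ci ≤ 12 := (hst (cl, cr, ci) (by simp)).2
      obtain ⟨lo, hi, hlo, hhi, hsafe⟩ := (hst (cl, cr, ci) (by simp)).1
      have hrest : ∀ st ∈ rest, pvGood s st ∧ st.2.2 ≤ 12 :=
        fun st hm => hst st (by simp [hm])
      have hk1 : 1 ≤ (13 - ci).toNat := by omega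
      have hw2 : 2 ≤ 2 ^ (13 - ci).toNat :=
        le_trans (by norm_num) (Nat.pow_le_pow_right (by norm_num) hk1)
      have hmu' : pvMu (⟨cl, cr, ci⟩ :: rest) = (2 ^ (13 - ci).toNat - 1) + pvMu rest := by
        simp [pvMu, pvW]
      by_cases hp : cl + PySem.Int.floordiv (10 - ci + 1) 2 < cr ∨ cr + PySem.Int.floordiv (10 - ci) 2 + 1 < cl
      · -- pruned: candidate ci - 1
        have hV : pvV s (cl, cr, ci) = ci - 1 := by
          simp only [pvV, solveF]
          rw [if_pos hp]
        rw [show loopF (f+1) ((cl, cr, ci) :: rest) acc s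
              = loopF f rest (pvMerge acc (ci - 1)) s from by simp only [loopF]; rw [if_pos hp]]
        rw [ih rest _ hrest (by omega)]
        simp [hV]
      · by_cases h10' : ci = 10
        · -- leaf: candidate 10
          have hV : pvV s (cl, cr, ci) = 10 := by
            simp only [pvV, solveF]
            rw [if_neg hp, if_pos h10']
          rw [show loopF (f+1) ((cl, cr, ci) :: rest) acc s
                = loopF f rest (pvMerge acc 10) s from by
              simp only [loopF]; rw [if_neg hp, if_pos h10']]
          rw [ih rest _ hrest (by omega)]
          simp [hV]
        · -- read s[ci-1] and expand
          have h11 : ci ≤ 11 := pvBand11 cl cr ci hp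
          obtain ⟨c, hc, good0, good1⟩ := pvSafe_step s lo hi cl cr ci hsafe hlo hhi hp h10'
          have hkk : (13 - ci).toNat = (13 - (ci + 1)).toNat + 1 := by omega
          have hchild : ∀ cl' cr', pvV s (cl', cr', ci + 1) = solveF ((13 - ci).toNat) cl' cr' s (ci + 1) := by
            intro cl' cr'; simp only [pvV]; rw [hkk]
          have hmuc : 2 ^ (13 - (ci + 1)).toNat - 1 + (2 ^ (13 - (ci + 1)).toNat - 1) + pvMu rest ≤ f := by
            have h2 : 2 ^ (13 - ci).toNat = 2 * 2 ^ (13 - (ci + 1)).toNat := by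
              rw [hkk, pow_succ, Nat.mul_comm]
            have hp1 : 1 ≤ 2 ^ (13 - (ci + 1)).toNat := Nat.one_le_two_pow
            omega
          have hstep : loopF (f+1) ((cl, cr, ci) :: rest) acc s
              = (if c = '1' then
                   loopF f ((if PySem.Int.mod ci 2 ≠ 0 then (cl + 1, cr, ci + 1) else (cl, cr + 1, ci + 1)) :: rest) acc s
                 else if c = '0' then
                   loopF f ((cl, cr, ci + 1) :: rest) acc s
                 else
                   loopF f ((cl, cr, ci + 1) :: (if PySem.Int.mod ci 2 ≠ 0 then (cl + 1, cr, ci + 1) else (cl, cr + 1, ci + 1)) :: rest) acc s) := by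
            simp only [loopF]; rw [if_neg hp, if_neg h10', hc]
          have hVst : pvV s (cl, cr, ci)
              = (if c = '1' then
                   if PySem.Int.mod ci 2 ≠ 0 then solveF ((13 - ci).toNat) (cl + 1) cr s (ci + 1)
                   else solveF ((13 - ci).toNat) cl (cr + 1) s (ci + 1)
                 else if c = '0' then solveF ((13 - ci).toNat) cl cr s (ci + 1)
                 else
                   if PySem.Int.mod ci 2 ≠ 0 then
                     min (solveF ((13 - ci).toNat) (cl + 1) cr s (ci + 1)) (solveF ((13 - ci).toNat) cl cr s (ci + 1))
                   else
                     min (solveF ((13 - ci).toNat) cl (cr + 1) s (ci + 1)) (solveF ((13 - ci).toNat) cl cr s (ci + 1))) := by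
            simp only [pvV, solveF]; rw [if_neg hp, if_neg h10', hc]
          rw [hstep, List.foldl_cons, hVst]
          have h12c : ci + 1 ≤ 12 := by omega
          have hmu1 : ∀ (bl br : Int), pvMu ((bl, br, ci + 1) :: rest) ≤ f := by
            intro bl br; simp [pvMu, pvW]; simp [pvMu] at hmuc; omega
          have hmu2 : ∀ (bl br : Int), pvMu ((cl, cr, ci + 1) :: (bl, br, ci + 1) :: rest) ≤ f := by
            intro bl br; simp [pvMu, pvW]; simp [pvMu] at hmuc; omega
          by_cases hc1 : c = '1'
          · subst hc1
            have g1 := good1 (Or.inl rfl)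
            simp only [reduceIte]
            by_cases hpar : PySem.Int.mod ci 2 ≠ 0
            · rw [if_pos hpar] at g1 ⊢
              rw [if_pos hpar]
              rw [ih _ acc (by
                    intro st hm
                    rcases List.mem_cons.mp hm with h | h
                    · subst h; exact ⟨g1, h12c⟩
                    · exact hrest st h) (hmu1 _ _), List.foldl_cons, hchild]
            · rw [if_neg hpar] at g1 ⊢
              rw [if_neg hpar]
              rw [ih _ acc (by
                    intro st hm
                    rcases List.mem_cons.mp hm with h | h
                    · subst h; exact ⟨g1, h12c⟩
                    · exact hrest st h) (hmu1 _ _), List.foldl_cons, hchild]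
          · rw [if_neg hc1, if_neg hc1]
            by_cases hc0 : c = '0'
            · subst hc0
              have g0 := good0 (Or.inl rfl)
              simp only [reduceIte]
              rw [ih _ acc (by
                    intro st hm
                    rcases List.mem_cons.mp hm with h | h
                    · subst h; exact ⟨g0, h12c⟩
                    · exact hrest st h) (hmu1 _ _), List.foldl_cons, hchild]
            · rw [if_neg hc0, if_neg hc0]
              have g0 := good0 (Or.inr ⟨hc0, hc1⟩)
              have g1 := good1 (Or.inr ⟨hc0, hc1⟩)
              by_cases hpar : PySem.Int.mod ci 2 ≠ 0
              · rw [if_pos hpar] at g1 ⊢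
                rw [if_pos hpar]
                rw [ih _ acc (by
                      intro st hm
                      rcases List.mem_cons.mp hm with h | h
                      · subst h; exact ⟨g0, h12c⟩
                      rcases List.mem_cons.mp h with h' | h'
                      · subst h'; exact ⟨g1, h12c⟩
                      · exact hrest st h') (hmu2 _ _),
                  List.foldl_cons, List.foldl_cons, hchild, hchild, pvMerge_assoc,
                  min_comm (solveF ((13 - ci).toNat) (cl + 1) cr s (ci + 1)) (solveF ((13 - ci).toNat) cl cr s (ci + 1))]
              · rw [if_neg hpar] at g1 ⊢
                rw [if_neg hpar]
                rw [ih _ acc (by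
                      intro st hm
                      rcases List.mem_cons.mp hm with h | h
                      · subst h; exact ⟨g0, h12c⟩
                      rcases List.mem_cons.mp h with h' | h'
                      · subst h'; exact ⟨g1, h12c⟩
                      · exact hrest st h') (hmu2 _ _),
                  List.foldl_cons, List.foldl_cons, hchild, hchild, pvMerge_assoc,
                  min_comm (solveF ((13 - ci).toNat) cl (cr + 1) s (ci + 1)) (solveF ((13 - ci).toNat) cl cr s (ci + 1))]

-- ===== VERDICT (by name: the statement is the Claim_ definition above) =====
theorem solve_spec : Claim_equal_solve := by
  intro l r s i _ hpre
  unfold Spec_solve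
  by_cases h13 : 13 ≤ i
  · -- the band is empty from position 13 on: both sides prune immediately and return i - 1
    have hp : l + PySem.Int.floordiv (10 - i + 1) 2 < r ∨ r + PySem.Int.floordiv (10 - i) 2 + 1 < l := by
      rw [pvFd2, pvFd2]; omega
    have hA : solve l r s i = i - 1 := by
      simp only [solve, solveF]; rw [if_pos hp]
    obtain ⟨m, hm⟩ := Nat.exists_eq_succ_of_ne_zero (by positivity : 2 ^ (13 - i).toNat ≠ 0)
    have hB : solve_alt l r s i = i - 1 := by
      simp only [solve_alt]; rw [hm]
      simp only [loopF]; rw [if_pos hp, loopF_nil]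
      simp [pvMerge]
    rw [hA, hB]
  · -- i ≤ 12: the worklist invariant at the singleton stack
    have := loop_inv s (2 ^ (13 - i).toNat) [(l, r, i)] none
      (by
        intro st hm; simp at hm; subst hm
        refine ⟨⟨r - l, r - l, le_refl _, le_refl _, hpre⟩, by show i ≤ 12; omega⟩)
      (by
        have h : pvMu [(l, r, i)] = 2 ^ (13 - i).toNat - 1 := by simp [pvMu, pvW]
        rw [h]; exact Nat.sub_le _ _)
    simp only [solve_alt, this, List.foldl_cons, List.foldl_nil]
    simp [pvMerge, pvV, solve]
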